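-- pv_equiv track=rewrite | github.com/DecibelM/db_aoc_21 | Day11.py | increase_energy
-- ===== SOURCE A (Python) =====
-- def increase_energy(inp):
--     flashes = []
--     for i in range(0, len(inp)):
--         for j in range(0, len(inp[0])):
--             inp[i][j] += 1
--             if inp[i][j] > 9:
--                 flashes.append([i, j])
--                 inp[i][j] = 0
--     return flashes
-- ===== SOURCE B (Python) =====
-- def increase_energy(inp):
--     cols = len(inp[0]) if inp else 0
--     for row in inp:
--         for j in range(cols):
--             row[j] += 1
--     flashes = [[i, j] for i in range(len(inp)) for j in range(cols) if inp[i][j] > 9]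
--     for i, j in flashes:
--         inp[i][j] = 0
--     return flashes
-- ===== Notes on version B (the rewrite author's own statement) =====
-- stated objective: alternative
-- what changed: The single increment-and-test nested loop is replaced by three differently shaped passes: an in-place per-row increment, a row-major comprehension collecting the flashing coordinates, then zeroing exactly the flashed cells.
import Mathlib
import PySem

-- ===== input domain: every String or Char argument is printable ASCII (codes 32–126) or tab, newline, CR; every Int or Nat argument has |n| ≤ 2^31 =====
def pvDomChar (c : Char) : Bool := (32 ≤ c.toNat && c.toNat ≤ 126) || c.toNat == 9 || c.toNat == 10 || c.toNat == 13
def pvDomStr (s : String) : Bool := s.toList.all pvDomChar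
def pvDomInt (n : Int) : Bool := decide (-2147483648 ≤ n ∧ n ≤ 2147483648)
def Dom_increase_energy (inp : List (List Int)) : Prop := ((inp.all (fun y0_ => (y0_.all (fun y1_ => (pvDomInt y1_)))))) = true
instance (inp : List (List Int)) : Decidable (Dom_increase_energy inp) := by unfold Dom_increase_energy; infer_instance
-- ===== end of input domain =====

-- B replaces the single increment-and-test nested loop by three passes (increment rows,
-- collect flashing coordinates by comprehension, zero the flashed cells); equivalence is
-- about the returned flash list (both mutate the argument grid identically in Python).

-- ===== PORT A =====
-- inner-loop body of A, for fixed row index i (the Python has no helper; naming it keeps the fold literal)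
def stepA (i : Nat) (st : List (List Int) × List (List Int)) (j : Nat) :
    List (List Int) × List (List Int) :=
  let g := st.1
  let v := (g.getD i []).getD j 0 + 1          -- inp[i][j] += 1
  let g1 := g.set i ((g.getD i []).set j v)
  if v > 9 then
    (g1.set i ((g1.getD i []).set j 0), st.2 ++ [[(i : Int), (j : Int)]])   -- flashes.append; inp[i][j] = 0
  else
    (g1, st.2)

def increase_energy (inp : List (List Int)) : List (List Int) :=
  ((List.range inp.length).foldl
      (fun st i => (List.range ((st.1.headD []).length)).foldl (stepA i) st)
      (inp, [])).2

-- ===== PORT B =====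
def incRow (c : Nat) (row : List Int) : List Int :=
  (List.range c).foldl (fun r j => r.set j (r.getD j 0 + 1)) row

def increase_energy_alt (inp : List (List Int)) : List (List Int) :=
  let cols := if inp.isEmpty then 0 else (inp.headD []).length
  let g := inp.map (incRow cols)
  (List.range g.length).flatMap (fun i =>
    (List.range cols).filterMap (fun j =>
      if (g.getD i []).getD j 0 > 9 then some [(i : Int), (j : Int)] else none))

-- ===== PRECONDITION & SPEC =====
-- Pre_ excludes ragged grids in which some row is shorter than the first row:
-- there both Pythons raise IndexError.
def Pre_increase_energy (inp : List (List Int)) : Prop :=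
  ∀ row ∈ inp, (inp.headD []).length ≤ row.length
instance (inp : List (List Int)) : Decidable (Pre_increase_energy inp) := by
  unfold Pre_increase_energy; infer_instance
def pvWitness_increase_energy : List (List Int) := [[1, 9], [3, 5]]

def Spec_increase_energy (inp : List (List Int)) (out : List (List Int)) : Prop := out = increase_energy_alt inp
instance (inp : List (List Int)) (out : List (List Int)) : Decidable (Spec_increase_energy inp out) := by unfold Spec_increase_energy; infer_instance

-- ===== CLAIM (what is proved, stated in full; the proofs are below) =====
def Claim_equal_increase_energy : Prop := ∀ (inp : List (List Int)), Dom_increase_energy inp → Pre_increase_energy inp → Spec_increase_energy inp (increase_energy inp)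

-- ===== LEMMAS AND PROOFS =====

-- effect of A's inner loop on the single row it touches
def rowGoA (c : Nat) (row : List Int) : List Int :=
  (List.range c).foldl
    (fun r j => if r.getD j 0 + 1 > 9 then (r.set j (r.getD j 0 + 1)).set j 0
                else r.set j (r.getD j 0 + 1)) row

-- flashes produced for row i, read off the original row values
def rowFl (i : Nat) (c : Nat) (row : List Int) : List (List Int) :=
  (List.range c).filterMap (fun j =>
    if row.getD j 0 + 1 > 9 then some [(i : Int), (j : Int)] else none)

lemma getD_set_self (l : List Int) (n : Nat) (a : Int) (h : n < l.length) :
    (l.set n a).getD n 0 = a := by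
  simp [List.getD_eq_getElem?_getD, h]

lemma getD_set_ne (l : List Int) (n m : Nat) (a : Int) (h : n ≠ m) :
    (l.set n a).getD m 0 = l.getD m 0 := by
  simp [List.getD_eq_getElem?_getD, List.getElem?_set_ne h]

lemma getDL_set_self (l : List (List Int)) (n : Nat) (a : List Int) (h : n < l.length) :
    (l.set n a).getD n [] = a := by
  simp [List.getD_eq_getElem?_getD, h]

lemma set_getD_self (l : List (List Int)) (n : Nat) (h : n < l.length) :
    l.set n (l.getD n []) = l := by
  have hg : l.getD n [] = l[n] := by
    simp [List.getD_eq_getElem?_getD, List.getElem?_eq_getElem h]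
  rw [hg, List.set_getElem_self]

lemma rowGoA_succ (c : Nat) (row : List Int) :
    rowGoA (c+1) row =
      if (rowGoA c row).getD c 0 + 1 > 9
        then ((rowGoA c row).set c ((rowGoA c row).getD c 0 + 1)).set c 0
        else (rowGoA c row).set c ((rowGoA c row).getD c 0 + 1) := by
  simp only [rowGoA, List.range_succ, List.foldl_append, List.foldl_cons, List.foldl_nil]

lemma rowFl_succ (i c : Nat) (row : List Int) :
    rowFl i (c+1) row = rowFl i c row ++
      (if row.getD c 0 + 1 > 9 then [[(i : Int), (c : Int)]] else []) := by
  simp only [rowFl, List.range_succ, List.filterMap_append, List.filterMap_cons,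
    List.filterMap_nil]
  split <;> simp_all

lemma length_rowGoA (c : Nat) (row : List Int) : (rowGoA c row).length = row.length := by
  induction c with
  | zero => simp [rowGoA]
  | succ c ih => rw [rowGoA_succ]; split <;> simp [ih]

lemma rowGoA_getD_untouched (c : Nat) (row : List Int) (j : Nat) (h : c ≤ j) :
    (rowGoA c row).getD j 0 = row.getD j 0 := by
  induction c with
  | zero => simp [rowGoA]
  | succ c ih =>
    have hcj : c ≠ j := by omega
    rw [rowGoA_succ]
    split
    · rw [getD_set_ne _ _ _ _ hcj, getD_set_ne _ _ _ _ hcj, ih (by omega)]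
    · rw [getD_set_ne _ _ _ _ hcj, ih (by omega)]

lemma stepA_eq (i j : Nat) (g acc : List (List Int)) (hi : i < g.length) :
    stepA i (g, acc) j =
      if (g.getD i []).getD j 0 + 1 > 9
        then (g.set i (((g.getD i []).set j ((g.getD i []).getD j 0 + 1)).set j 0),
              acc ++ [[(i : Int), (j : Int)]])
        else (g.set i ((g.getD i []).set j ((g.getD i []).getD j 0 + 1)), acc) := by
  simp only [stepA, getDL_set_self _ _ _ hi, List.set_set]

lemma innerA_eq (c i : Nat) (g acc : List (List Int)) (hi : i < g.length) :
    (List.range c).foldl (stepA i) (g, acc)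
      = (g.set i (rowGoA c (g.getD i [])), acc ++ rowFl i c (g.getD i [])) := by
  induction c with
  | zero =>
    simp only [List.range_zero, List.foldl_nil, rowGoA, rowFl, List.filterMap_nil,
      List.append_nil]
    rw [set_getD_self g i hi]
  | succ c ih =>
    simp only [List.range_succ, List.foldl_append, List.foldl_cons, List.foldl_nil, ih]
    have hi' : i < (g.set i (rowGoA c (g.getD i []))).length := by simpa using hi
    rw [stepA_eq i c _ _ hi', getDL_set_self _ _ _ hi]
    have hv : (rowGoA c (g.getD i [])).getD c 0 = (g.getD i []).getD c 0 :=
      rowGoA_getD_untouched c _ c le_rfl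
    rw [hv, rowGoA_succ, rowFl_succ, hv]
    split
    · rw [List.set_set, List.set_set]
      simp [List.append_assoc]
    · rw [List.set_set]
      simp

-- the grid after the first k outer iterations of A
def Gk (inp : List (List Int)) (c0 k : Nat) : List (List Int) :=
  (List.range inp.length).map
    (fun t => if t < k then rowGoA c0 (inp.getD t []) else inp.getD t [])

lemma Gk_zero (inp : List (List Int)) (c0 : Nat) : Gk inp c0 0 = inp := by
  apply List.ext_getElem
  · simp [Gk]
  · intro t h1 h2
    simp [Gk, List.getD_eq_getElem?_getD, List.getElem?_eq_getElem h2]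

lemma length_Gk (inp : List (List Int)) (c0 k : Nat) : (Gk inp c0 k).length = inp.length := by
  simp [Gk]

lemma Gk_getD (inp : List (List Int)) (c0 k i : Nat) (hi : i < inp.length) :
    (Gk inp c0 k).getD i [] =
      (if i < k then rowGoA c0 (inp.getD i []) else inp.getD i []) := by
  simp [Gk, List.getD_eq_getElem?_getD, hi]

lemma Gk_succ (inp : List (List Int)) (c0 k : Nat) (hk : k < inp.length) :
    (Gk inp c0 k).set k (rowGoA c0 (inp.getD k [])) = Gk inp c0 (k+1) := by
  apply List.ext_getElem
  · simp [Gk]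
  · intro t h1 h2
    have ht : t < inp.length := by simpa [Gk] using h2
    rw [List.getElem_set]
    simp only [Gk, List.getElem_map, List.getElem_range]
    rcases eq_or_ne k t with rfl | hne
    · simp
    · simp only [if_neg hne]
      by_cases h : t < k
      · rw [if_pos h, if_pos (by omega)]
      · rw [if_neg h, if_neg (by omega)]

lemma headD_len_Gk (inp : List (List Int)) (c0 k : Nat)
    (hc0 : (inp.headD []).length = c0) (hne : inp ≠ []) :
    ((Gk inp c0 k).headD []).length = c0 := by
  have h0 : 0 < inp.length := List.length_pos_of_ne_nil hne
  have h0' : 0 < (Gk inp c0 k).length := by simpa [length_Gk] using h0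
  have hhead : ∀ (l : List (List Int)), 0 < l.length → l.headD [] = l.getD 0 [] := by
    intro l hl
    cases l with
    | nil => simp at hl
    | cons a t => simp [List.getD_eq_getElem?_getD]
  have hc0' : (inp.getD 0 []).length = c0 := by rw [← hhead _ h0]; exact hc0
  rw [hhead _ h0', Gk_getD inp c0 k 0 h0]
  split
  · rw [length_rowGoA]; exact hc0'
  · exact hc0'

lemma outerA_eq (inp : List (List Int)) (k : Nat) (hk : k ≤ inp.length) :
    (List.range k).foldl
        (fun st i => (List.range ((st.1.headD []).length)).foldl (stepA i) st)
        (inp, [])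
      = (Gk inp ((inp.headD []).length) k,
         (List.range k).flatMap (fun i => rowFl i ((inp.headD []).length) (inp.getD i []))) := by
  induction k with
  | zero => simp [Gk_zero]
  | succ k ih =>
    have hk' : k < inp.length := by omega
    have hne : inp ≠ [] := by intro h; rw [h] at hk'; simp at hk'
    simp only [List.range_succ, List.foldl_append, List.foldl_cons, List.foldl_nil,
      ih (by omega)]
    rw [headD_len_Gk inp _ k rfl hne,
        innerA_eq _ k _ _ (by simpa [length_Gk] using hk'),
        Gk_getD inp _ k k hk', if_neg (by omega), Gk_succ inp _ k hk']
    simp [List.flatMap_append]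

lemma incRow_succ (c : Nat) (row : List Int) :
    incRow (c+1) row = (incRow c row).set c ((incRow c row).getD c 0 + 1) := by
  simp only [incRow, List.range_succ, List.foldl_append, List.foldl_cons, List.foldl_nil]

lemma length_incRow (c : Nat) (row : List Int) : (incRow c row).length = row.length := by
  induction c with
  | zero => simp [incRow]
  | succ c ih => rw [incRow_succ]; simp [ih]

lemma incRow_getD (c : Nat) (row : List Int) (j : Nat) (hj : j < row.length) :
    (incRow c row).getD j 0 = if j < c then row.getD j 0 + 1 else row.getD j 0 := by
  induction c with
  | zero => simp [incRow]
  | succ c ih =>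
    rw [incRow_succ]
    rcases eq_or_ne c j with rfl | hne
    · rw [getD_set_self _ _ _ (by simpa [length_incRow] using hj), ih]
      simp
    · rw [getD_set_ne _ _ _ _ hne, ih]
      by_cases h : j < c
      · rw [if_pos h, if_pos (by omega)]
      · rw [if_neg h, if_neg (by omega)]

lemma filterMap_range_congr {β : Type} (n : Nat) (f g : Nat → Option β)
    (h : ∀ j < n, f j = g j) : (List.range n).filterMap f = (List.range n).filterMap g := by
  apply List.filterMap_congr
  intro j hj
  exact h j (List.mem_range.mp hj)

lemma flatMap_range_congr {β : Type} (n : Nat) (f g : Nat → List β)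
    (h : ∀ i < n, f i = g i) : (List.range n).flatMap f = (List.range n).flatMap g := by
  induction n with
  | zero => simp
  | succ n ih =>
    simp only [List.range_succ, List.flatMap_append, List.flatMap_cons, List.flatMap_nil,
      List.append_nil]
    rw [ih (fun i hi => h i (by omega)), h n (by omega)]

-- ===== VERDICT (by name: the statement is the Claim_ definition above) =====
theorem increase_energy_spec : Claim_equal_increase_energy := by
  intro inp _ hpre
  unfold Spec_increase_energy increase_energy increase_energy_alt
  rw [outerA_eq inp inp.length le_rfl]
  have hcols : (if inp.isEmpty then 0 else (inp.headD []).length) = (inp.headD []).length := by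
    cases inp <;> simp
  rw [hcols]
  simp only [List.length_map]
  apply flatMap_range_congr
  intro i hi
  have hrow : (inp.map (incRow ((inp.headD []).length))).getD i []
      = incRow ((inp.headD []).length) (inp.getD i []) := by
    simp [List.getD_eq_getElem?_getD, List.getElem?_eq_getElem hi]
  rw [hrow]
  apply filterMap_range_congr
  intro j hj
  have hmem : inp.getD i [] ∈ inp := by
    rw [List.getD_eq_getElem?_getD, List.getElem?_eq_getElem hi]
    exact List.getElem_mem hi
  have hlen : j < (inp.getD i []).length := lt_of_lt_of_le hj (hpre _ hmem)
  rw [incRow_getD _ (inp.getD i []) j hlen, if_pos hj]
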